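-- pv_equiv track=rewrite | github.com/sandyjayani/github-python | extra - 6.py | check_formula
-- ===== SOURCE A (Python) =====
-- def check_formula(formula):
--     symbols = ['+', '-', '*','/' , '=']
--     found_equals = False
--     found_op = False
--
--     for i in range (len(formula)):
--         character = formula[i]
--         if character in symbols: #checks against symbol list
--             if found_op:
--                 return False
--             if i==0 or i == len(formula) -1: #checks if symbol at beg or end
--                 return False
--             if not formula[i-1].isdigit() or not formula[i+1].isdigit():
--                 return False #checks if digit on either side symbol
--             found_op = True
--             if character == '=': #checks f equal symbol
--                 found_equals = True
--         elif character.isdigit(): #checks if is a digit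
--             found_op = False #false if not allowed symbol nor a digit
--         else:
--             return False
--     if not found_equals:
--         return False
--
--     return True
-- ===== SOURCE B (Python) =====
-- def check_formula(formula):
--     # Split the formula on the operator characters into digit-run tokens,
--     # then it is valid iff '=' occurs and every token is a non-empty digit run.
--     ops = '+-*/='
--     tokens = []
--     cur = ''
--     for ch in formula:
--         if ch in ops:
--             tokens.append(cur)
--             cur = ''
--         else:
--             cur += ch
--     tokens.append(cur)
--     return '=' in formula and all(t != '' and t.isdigit() for t in tokens)
-- ===== Notes on version B (the rewrite author's own statement) =====
-- stated objective: idiomatic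
-- what changed: B splits the formula on the operator set into digit-run tokens and validates the token list ('=' present and every token a non-empty digit run) instead of scanning each index with neighbour lookups and found_op/found_equals flags.
import Mathlib
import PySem

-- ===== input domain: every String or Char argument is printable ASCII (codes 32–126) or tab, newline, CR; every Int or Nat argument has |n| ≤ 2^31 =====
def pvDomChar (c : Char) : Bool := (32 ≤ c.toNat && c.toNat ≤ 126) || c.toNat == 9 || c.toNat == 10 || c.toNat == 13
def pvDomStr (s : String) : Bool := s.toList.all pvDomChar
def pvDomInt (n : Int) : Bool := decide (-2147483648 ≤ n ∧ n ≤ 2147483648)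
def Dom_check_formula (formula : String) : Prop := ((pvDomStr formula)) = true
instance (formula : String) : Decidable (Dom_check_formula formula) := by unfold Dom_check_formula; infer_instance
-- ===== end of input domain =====

-- B replaces A's index scan (neighbour lookups + found_op/found_equals flags) by splitting
-- the string on the operator set into tokens and validating the token list (idiomatic).

-- ===== PORT A =====
-- symbols = ['+', '-', '*', '/', '=']
def pvSymbols : List Char := ['+', '-', '*', '/', '=']

-- the for-loop over range(len(formula)) with early returns, state (found_op, found_equals);
-- all three index accesses are in range when evaluated (guarded by the loop bound and the
-- i==0 / i==len-1 branch), so List.getD is exact there.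
def chkGo (cs : List Char) (i : Nat) (found_op found_equals : Bool) : Bool :=
  if h : i < cs.length then
    let character := cs.getD i ' '
    if pvSymbols.contains character then
      if found_op then false
      else if i = 0 ∨ i = cs.length - 1 then false
      else if !(PySem.Chars.isdigit (cs.getD (i - 1) ' '))
              || !(PySem.Chars.isdigit (cs.getD (i + 1) ' ')) then false
      else chkGo cs (i + 1) true (if character = '=' then true else found_equals)
    else if PySem.Chars.isdigit character then
      chkGo cs (i + 1) false found_equals
    else false
  else
    if !found_equals then false else true
termination_by cs.length - i

def check_formula (formula : String) : Bool :=
  chkGo formula.toList 0 false false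

-- ===== PORT B =====
-- ops = '+-*/='
def pvBOps : List Char := ['+', '-', '*', '/', '=']

-- the loop body: accumulate (tokens, cur)
def pvBStep (acc : List (List Char) × List Char) (ch : Char) : List (List Char) × List Char :=
  if pvBOps.contains ch then (acc.1 ++ [acc.2], []) else (acc.1, acc.2 ++ [ch])

-- t != '' and t.isdigit()
def pvGoodTok (t : List Char) : Bool := decide (t ≠ []) && PySem.Chars.strIsdigit t

def check_formula_alt (formula : String) : Bool :=
  let cs := formula.toList
  let p := cs.foldl pvBStep ([], [])
  let tokens := p.1 ++ [p.2]
  -- `'=' in formula` for a one-character substring is exactly character membership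
  cs.contains '=' && tokens.all pvGoodTok

-- ===== PRECONDITION & SPEC =====
def Spec_check_formula (formula : String) (out : Bool) : Prop := out = check_formula_alt formula
instance (formula : String) (out : Bool) : Decidable (Spec_check_formula formula out) := by unfold Spec_check_formula; infer_instance

-- ===== CLAIM (what is proved, stated in full; the proofs are below) =====
def Claim_equal_check_formula : Prop := ∀ (formula : String), Dom_check_formula formula → Spec_check_formula formula (check_formula formula)

-- ===== LEMMAS AND PROOFS =====

-- suffix-structural reading of A's loop (prev char assumed digit)
def pvScan (fe : Bool) : List Char → Bool
  | [] => fe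
  | c :: rs =>
    if pvSymbols.contains c then
      match rs with
      | [] => false
      | d :: _ => if PySem.Chars.isdigit d then pvScan (fe || decide (c = '=')) rs else false
    else if PySem.Chars.isdigit c then pvScan fe rs
    else false

-- structural splitter equal to B's foldl
def pvSplitR : List Char → List (List Char)
  | [] => [[]]
  | c :: rs =>
    if pvBOps.contains c then [] :: pvSplitR rs
    else (c :: (pvSplitR rs).headD []) :: (pvSplitR rs).tail

lemma pvSplitR_ne_nil (cs : List Char) : pvSplitR cs ≠ [] := by
  cases cs
  · simp [pvSplitR]
  · simp only [pvSplitR]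
    split <;> simp

lemma pv_op_not_digit (c : Char) (h : pvSymbols.contains c = true) :
    PySem.Chars.isdigit c = false := by
  simp [pvSymbols] at h
  rcases h with h | h | h | h | h <;> subst h <;> decide

lemma pv_digit_not_op (c : Char) (h : PySem.Chars.isdigit c = true) :
    pvSymbols.contains c = false := by
  by_contra hc
  simp only [Bool.not_eq_false] at hc
  rw [pv_op_not_digit c hc] at h
  exact Bool.false_ne_true h

lemma pv_drop_cons (cs : List Char) (i : Nat) (h : i < cs.length) :
    cs.drop i = cs.getD i ' ' :: cs.drop (i + 1) := by
  rw [List.drop_eq_getElem_cons h, List.getD_eq_getElem _ _ h]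

lemma chkGo_eq_scan (n : Nat) : ∀ (cs : List Char) (i : Nat) (fe : Bool),
    cs.length - i = n → 1 ≤ i → i ≤ cs.length →
    PySem.Chars.isdigit (cs.getD (i - 1) ' ') = true →
    chkGo cs i false fe = pvScan fe (cs.drop i) := by
  induction n using Nat.strong_induction_on with
  | _ n IH =>
    intro cs i fe hn h1 hle hd
    by_cases hi : i < cs.length
    · rw [chkGo]
      simp only [hi, dite_true]
      set c := cs.getD i ' ' with hc
      rw [pv_drop_cons cs i hi, ← hc]
      by_cases hop : pvSymbols.contains c = true
      · -- operator branch
        simp only [hop, if_true, Bool.false_eq_true, if_false]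
        rw [pvScan.eq_def]
        simp only [hop, if_true]
        by_cases hlast : i = cs.length - 1
        · have hdrop : cs.drop (i + 1) = [] := by
            apply List.drop_eq_nil_of_le; omega
          rw [hdrop]
          simp only [hlast, or_true, if_true]
        · have h0 : ¬ (i = 0 ∨ i = cs.length - 1) := by omega
          simp only [h0, if_false, hd, Bool.not_true, Bool.false_or]
          have hi1 : i + 1 < cs.length := by omega
          rw [pv_drop_cons cs (i+1) hi1]
          set d := cs.getD (i+1) ' ' with hdd
          by_cases hdig : PySem.Chars.isdigit d = true
          · simp only [hdig, Bool.not_true, if_true]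
            -- A takes one more step consuming the digit d
            rw [chkGo]
            simp only [hi1, dite_true, ← hdd, pv_digit_not_op d hdig, Bool.false_eq_true,
              if_false, hdig, if_true]
            -- pvScan consumes d as a digit too
            rw [pvScan.eq_def]
            simp only [pv_digit_not_op d hdig, Bool.false_eq_true, if_false, hdig, if_true]
            have heq : (if c = '=' then true else fe) = (fe || decide (c = '=')) := by
              by_cases h : c = '=' <;> simp [h]
            rw [heq]
            apply IH (cs.length - (i + 2)) (by omega) cs (i + 2) _ rfl (by omega) (by omega)
            simpa using hdig
          · simp only [Bool.not_eq_true] at hdig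
            simp [hdig]
      · -- not an operator
        simp only [Bool.not_eq_true] at hop
        simp only [hop, Bool.false_eq_true, if_false]
        rw [pvScan.eq_def]
        simp only [hop, Bool.false_eq_true, if_false]
        by_cases hdig : PySem.Chars.isdigit c = true
        · simp only [hdig, if_true]
          apply IH (cs.length - (i + 1)) (by omega) cs (i + 1) _ rfl (by omega) (by omega)
          simpa using hdig
        · simp only [Bool.not_eq_true] at hdig
          simp [hdig]
    · have : i = cs.length := by omega
      subst this
      rw [chkGo]
      simp only [lt_irrefl, dite_false]
      rw [List.drop_length, pvScan]
      cases fe <;> rfl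

lemma pv_headD_tail (l : List (List Char)) (h : l ≠ []) : l.headD [] :: l.tail = l := by
  cases l with
  | nil => exact absurd rfl h
  | cons a t => rfl

-- B's foldl equals the structural splitter (with pending accumulator glued onto the first token)
lemma pv_foldl_split (cs : List Char) : ∀ (tokens : List (List Char)) (cur : List Char),
    (cs.foldl pvBStep (tokens, cur)).1 ++ [(cs.foldl pvBStep (tokens, cur)).2] =
      tokens ++ (cur ++ (pvSplitR cs).headD []) :: (pvSplitR cs).tail := by
  induction cs with
  | nil => intro tokens cur; simp [pvSplitR]
  | cons c rs ih =>
    intro tokens cur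
    by_cases hop : pvBOps.contains c = true
    · simp only [List.foldl_cons, pvBStep, hop, if_true]
      rw [ih]
      simp only [pvSplitR, hop, if_true, List.headD_cons, List.tail_cons, List.nil_append]
      rw [pv_headD_tail _ (pvSplitR_ne_nil rs)]
      simp
    · simp only [Bool.not_eq_true] at hop
      simp only [List.foldl_cons, pvBStep, hop, Bool.false_eq_true, if_false]
      rw [ih]
      simp only [pvSplitR, hop, Bool.false_eq_true, if_false, List.headD_cons,
        List.tail_cons, List.append_assoc, List.singleton_append]

-- the '=' flag can be split off pvScan
lemma pvScan_fe (rs : List Char) : ∀ (fe : Bool),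
    pvScan fe rs = (pvScan true rs && (fe || rs.contains '=')) := by
  induction rs with
  | nil => intro fe; simp [pvScan]
  | cons c rs ih =>
    intro fe
    by_cases hop : pvSymbols.contains c = true
    · rw [pvScan.eq_def, pvScan.eq_def]
      simp only [hop, if_true]
      cases rs with
      | nil => simp
      | cons d rs' =>
        by_cases hdig : PySem.Chars.isdigit d = true
        · simp only [hdig, if_true, Bool.true_or]
          rw [ih, ih]
          by_cases h : c = '=' <;> cases fe <;> cases hx : pvScan true (d :: rs') <;>
            cases hy : (rs' : List Char).contains '=' <;>
            (simp_all
             try exact fun h2 => absurd h2.symm h)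
        · simp only [Bool.not_eq_true] at hdig
          simp [hdig]
    · simp only [Bool.not_eq_true] at hop
      have hne : (c == '=') = false := by
        by_contra h
        simp only [Bool.not_eq_false, beq_iff_eq] at h
        subst h
        simp [pvSymbols] at hop
      rw [pvScan.eq_def, pvScan.eq_def]
      simp only [hop, Bool.false_eq_true, if_false]
      by_cases hdig : PySem.Chars.isdigit c = true
      · simp only [hdig, if_true]
        rw [ih]
        have hne' : ¬ ('=' = c) := fun h => by simp [h.symm] at hne
        simp [hne']
      · simp only [Bool.not_eq_true] at hdig
        simp [hdig]

-- token-list views of B (whole list, and with the first token's nonemptiness waived)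
def pvP (rs : List Char) : Bool := (pvSplitR rs).all pvGoodTok
def pvQ (rs : List Char) : Bool :=
  ((pvSplitR rs).headD []).all PySem.Chars.isdigit && ((pvSplitR rs).tail).all pvGoodTok

lemma pvGoodTok_cons (x : Char) (h : List Char) :
    pvGoodTok (x :: h) = (PySem.Chars.isdigit x && h.all PySem.Chars.isdigit) := by
  simp [pvGoodTok, PySem.Chars.strIsdigit]

lemma pvP_cons (x : Char) (rs : List Char) :
    pvP (x :: rs) = (PySem.Chars.isdigit x && pvQ rs) := by
  by_cases hop : pvBOps.contains x = true
  · have hxd : PySem.Chars.isdigit x = false := pv_op_not_digit x hop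
    simp only [pvP, pvSplitR, hop, if_true, List.all_cons, hxd, Bool.false_and]
    simp [pvGoodTok]
  · simp only [Bool.not_eq_true] at hop
    simp only [pvP, pvSplitR, hop, Bool.false_eq_true, if_false, List.all_cons,
      pvGoodTok_cons, pvQ]
    rw [Bool.and_assoc]

lemma pvQ_eq_scan (n : Nat) : ∀ (rs : List Char), rs.length = n → pvQ rs = pvScan true rs := by
  induction n using Nat.strong_induction_on with
  | _ n IH =>
    intro rs hn
    cases rs with
    | nil => simp [pvQ, pvSplitR, pvScan]
    | cons c rs =>
      by_cases hop : pvSymbols.contains c = true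
      · have hQ : pvQ (c :: rs) = pvP rs := by
          simp only [pvQ, pvSplitR, pvP]
          rw [if_pos (show pvBOps.contains c = true from hop)]
          simp
        rw [hQ, pvScan.eq_def]
        simp only [hop, if_true]
        cases rs with
        | nil => simp [pvP, pvSplitR, pvGoodTok]
        | cons d rs' =>
          by_cases hdig : PySem.Chars.isdigit d = true
          · simp only [hdig, if_true, Bool.true_or]
            rw [pvScan.eq_def]
            simp only [pv_digit_not_op d hdig, Bool.false_eq_true, if_false, hdig, if_true]
            rw [pvP_cons, hdig, Bool.true_and]
            exact IH rs'.length (by simp at hn; omega) rs' rfl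
          · simp only [Bool.not_eq_true] at hdig
            simp [hdig, pvP_cons]
      · simp only [Bool.not_eq_true] at hop
        have hQ : pvQ (c :: rs) = (PySem.Chars.isdigit c && pvQ rs) := by
          simp only [pvQ, pvSplitR, show pvBOps.contains c = false from hop,
            Bool.false_eq_true, if_false, List.headD_cons, List.tail_cons, List.all_cons]
          rw [Bool.and_assoc]
        rw [hQ, pvScan.eq_def]
        simp only [hop, Bool.false_eq_true, if_false]
        by_cases hdig : PySem.Chars.isdigit c = true
        · simp only [hdig, if_true, Bool.true_and]
          exact IH rs.length (by simp at hn; omega) rs rfl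
        · simp only [Bool.not_eq_true] at hdig
          simp [hdig]

theorem check_formula_spec : Claim_equal_check_formula := by
  intro formula _
  unfold Spec_check_formula check_formula check_formula_alt
  simp only []
  rw [pv_foldl_split formula.toList [] []]
  rw [List.nil_append, List.nil_append, pv_headD_tail _ (pvSplitR_ne_nil _)]
  cases hcs : formula.toList with
  | nil =>
    rw [chkGo]
    simp [pvSplitR]
  | cons c rs =>
    rw [chkGo]
    simp only [List.length_cons, Nat.succ_pos, dite_true, List.getD_cons_zero]
    have hPP : (pvSplitR (c :: rs)).all pvGoodTok = pvP (c :: rs) := rfl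
    rw [hPP]
    by_cases hop : pvSymbols.contains c = true
    · have hxd : PySem.Chars.isdigit c = false := pv_op_not_digit c hop
      simp [pvP_cons, hxd]
    · simp only [Bool.not_eq_true] at hop
      by_cases hdig : PySem.Chars.isdigit c = true
      · have hne : (c == '=') = false := by
          by_contra h
          simp only [Bool.not_eq_false, beq_iff_eq] at h
          subst h
          simp [pvSymbols] at hop
        simp only [hop, Bool.false_eq_true, if_false, hdig, if_true]
        rw [chkGo_eq_scan ((c :: rs).length - 1) (c :: rs) 1 false rfl le_rfl
          (by simp) (by simpa using hdig)]
        simp only [List.drop_one, List.tail_cons]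
        have hne2 : ('=' == c) = false := by
          by_contra hh
          simp only [Bool.not_eq_false, beq_iff_eq] at hh
          subst hh
          simp [pvSymbols] at hop
        rw [pvScan_fe, ← pvQ_eq_scan rs.length rs rfl, pvP_cons, hdig, Bool.true_and,
          List.contains_cons, hne2, Bool.false_or]
        rw [Bool.and_comm]
      · simp only [Bool.not_eq_true] at hdig
        simp [hdig, pvP_cons]
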